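-- pv_equiv track=rewrite | github.com/sambacha/gitxxx | gitxxx/git-filter-blobs.py | _NAME_FILTER
-- ===== SOURCE A (Python) =====
-- _FILE_EXT_FILTER = ["c", "cpp", "cxx", "cc", "h", "hpp", "hxx", "hh"]
--
-- def _NAME_FILTER(file_name):
--     if len(_FILE_EXT_FILTER) < 1:
--         return True
--     file_name_lower = file_name.lower()
--     for ext in _FILE_EXT_FILTER:
--         if len(file_name_lower) > len(ext) and file_name_lower.endswith(ext):
--             if file_name_lower[len(file_name_lower) - len(ext) - 1] == ".":
--                 return True
--     return False
-- ===== SOURCE B (Python) =====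
-- _FILE_EXT_FILTER = ["c", "cpp", "cxx", "cc", "h", "hpp", "hxx", "hh"]
-- _EXTS = frozenset(_FILE_EXT_FILTER)
--
-- def _NAME_FILTER(file_name):
--     # One left-to-right pass: track the characters seen since the most recent dot
--     # (None before any dot), then a single set lookup; no per-extension endswith loop.
--     ext = None
--     for ch in file_name.lower():
--         ext = "" if ch == "." else (None if ext is None else ext + ch)
--     return ext in _EXTS
-- ===== Notes on version B (the rewrite author's own statement) =====
-- stated objective: alternative
-- what changed: Replaces the per-extension loop of endswith + index checks by a single left-to-right pass that tracks the characters since the most recent dot, followed by one set membership test.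
import Mathlib
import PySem

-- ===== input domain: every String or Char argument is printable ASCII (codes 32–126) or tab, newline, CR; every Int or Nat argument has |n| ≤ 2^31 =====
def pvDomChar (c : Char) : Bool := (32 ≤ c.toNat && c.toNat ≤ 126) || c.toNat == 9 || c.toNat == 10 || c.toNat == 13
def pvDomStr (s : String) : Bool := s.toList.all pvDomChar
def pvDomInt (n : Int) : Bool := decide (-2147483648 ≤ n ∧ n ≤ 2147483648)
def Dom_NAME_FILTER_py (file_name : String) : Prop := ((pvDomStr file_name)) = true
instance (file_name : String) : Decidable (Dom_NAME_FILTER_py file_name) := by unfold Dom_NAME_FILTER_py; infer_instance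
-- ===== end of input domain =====

-- B replaces A's per-extension endswith loop by one pass tracking the suffix after the last dot plus a single membership test (alternative decomposition, same cost class).


-- the module constant _FILE_EXT_FILTER
def pvExtFilter : List (List Char) :=
  [['c'], ['c','p','p'], ['c','x','x'], ['c','c'], ['h'], ['h','p','p'], ['h','x','x'], ['h','h']]

-- ===== PORT A =====
def NAME_FILTER_py (file_name : String) : Bool :=
  if pvExtFilter.length < 1 then true
  else
    let fl := PySem.Chars.lower file_name.toList
    pvExtFilter.foldl (fun acc ext =>
      acc ||
        (decide (fl.length > ext.length) && PySem.Chars.endswith fl ext &&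
          (PySem.Chars.pyGet? fl ((fl.length : Int) - (ext.length : Int) - 1) == some '.'))) false

-- ===== PORT B =====
-- Source B's loop body: chars seen since the most recent dot (none before any dot)
def pvStep (ext : Option (List Char)) (ch : Char) : Option (List Char) :=
  if ch = '.' then some [] else ext.map (· ++ [ch])

def NAME_FILTER_py_alt (file_name : String) : Bool :=
  match (PySem.Chars.lower file_name.toList).foldl pvStep none with
  | none => false
  | some e => pvExtFilter.contains e

-- ===== PRECONDITION & SPEC =====
def Spec_NAME_FILTER_py (file_name : String) (out : Bool) : Prop := out = NAME_FILTER_py_alt file_name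
instance (file_name : String) (out : Bool) : Decidable (Spec_NAME_FILTER_py file_name out) := by unfold Spec_NAME_FILTER_py; infer_instance

-- ===== CLAIM (what is proved, stated in full; the proofs are below) =====
def Claim_equal_NAME_FILTER_py : Prop := ∀ (file_name : String), Dom_NAME_FILTER_py file_name → Spec_NAME_FILTER_py file_name (NAME_FILTER_py file_name)

-- ===== LEMMAS AND PROOFS =====

theorem pvFoldOr (p : List Char → Bool) (E : List (List Char)) (b : Bool) :
    E.foldl (fun acc e => acc || p e) b = (b || E.any p) := by
  induction E generalizing b with
  | nil => simp
  | cons e E ih => simp [List.foldl, ih, Bool.or_assoc]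

-- A's per-extension test is exactly "'.'::ext is a suffix"
theorem pvCondA (l ext : List Char) :
    ((decide (l.length > ext.length) && PySem.Chars.endswith l ext &&
      (PySem.Chars.pyGet? l ((l.length : Int) - (ext.length : Int) - 1) == some '.')) = true)
      ↔ ('.' :: ext) <:+ l := by
  constructor
  · intro h
    simp only [Bool.and_eq_true, decide_eq_true_eq, beq_iff_eq] at h
    obtain ⟨⟨hlen, hend⟩, hget⟩ := h
    rw [PySem.Chars.endswith_iff] at hend
    obtain ⟨p, hp⟩ := hend
    have hplen : p.length = l.length - ext.length := by
      have := congrArg List.length hp; simp at this; omega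
    have hpne : p ≠ [] := by intro h0; subst h0; simp at hplen; omega
    obtain ⟨p', a, rfl⟩ := p.eq_nil_or_concat.resolve_left hpne
    rw [List.concat_eq_append] at hp
    have hlen' : l.length = p'.length + 1 + ext.length := by
      have := congrArg List.length hp; simp at this; omega
    have hcast : ((l.length : Int) - (ext.length : Int) - 1) = ((p'.length : Nat) : Int) := by
      omega
    rw [hcast, PySem.Chars.pyGet?_eq_listPyGet?, PySem.List.pyGet?_natCast, ← hp,
        List.append_assoc, List.getElem?_append_right (le_refl p'.length)] at hget
    simp at hget
    subst hget
    exact ⟨p', by simpa using hp⟩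
  · rintro ⟨t, rfl⟩
    simp only [Bool.and_eq_true, decide_eq_true_eq, beq_iff_eq]
    refine ⟨⟨by simp; omega, ?_⟩, ?_⟩
    · rw [PySem.Chars.endswith_iff]; exact ⟨t ++ ['.'], by simp⟩
    · have hcast : (((t ++ '.' :: ext).length : Int) - (ext.length : Int) - 1) = ((t.length : Nat) : Int) := by
        simp; omega
      rw [hcast, PySem.Chars.pyGet?_eq_listPyGet?, PySem.List.pyGet?_natCast]
      rw [List.getElem?_append_right (by omega)]
      simp

theorem pvLast_some_iff (l : List Char) (e : List Char) :
    l.foldl pvStep none = some e ↔ (('.' :: e) <:+ l ∧ '.' ∉ e) := by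
  induction l using List.reverseRecOn generalizing e with
  | nil => simp
  | append_singleton l c ih =>
    rw [List.foldl_append]
    by_cases hc : c = '.'
    · subst hc
      simp only [List.foldl, pvStep]
      constructor
      · rintro h
        have he : e = [] := by simpa using h.symm
        subst he
        exact ⟨⟨l, by simp⟩, by simp⟩
      · rintro ⟨⟨t, ht⟩, hfree⟩
        rcases e.eq_nil_or_concat with rfl | ⟨e', a, rfl⟩
        · rfl
        · exfalso
          have : (t ++ '.' :: e') ++ [a] = l ++ ['.'] := by simpa using ht
          have hsplit : (t ++ '.' :: e') ++ [a] = l ++ ['.'] := by simpa using ht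
          have ha : a = '.' := by
            have h2 := congrArg List.getLast? hsplit
            rw [List.getLast?_concat, List.getLast?_concat] at h2
            exact Option.some.inj h2
          exact hfree (by simp [ha])
    · simp only [List.foldl, pvStep, if_neg hc]
      constructor
      · intro h
        rcases hst : l.foldl pvStep none with _ | e'
        · rw [hst] at h; simp at h
        · rw [hst] at h
          simp only [Option.map_some, Option.some.injEq] at h
          obtain ⟨⟨t, ht⟩, hfree⟩ := (ih e').mp hst
          subst h
          refine ⟨⟨t, by simpa using congrArg (· ++ [c]) ht⟩, ?_⟩
          simp only [List.mem_append, List.mem_singleton]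
          rintro (h1 | h2)
          · exact hfree h1
          · exact hc h2.symm
      · rintro ⟨⟨t, ht⟩, hfree⟩
        rcases e.eq_nil_or_concat with rfl | ⟨e', a, rfl⟩
        · exfalso
          have : t ++ ['.'] = l ++ [c] := by simpa using ht
          have := congrArg List.getLast? this
          simp at this
          exact hc this.symm
        · have hsplit : (t ++ '.' :: e') ++ [a] = l ++ [c] := by simpa using ht
          have ha : a = c := by
            have h2 := congrArg List.getLast? hsplit
            rw [List.getLast?_concat, List.getLast?_concat] at h2
            exact Option.some.inj h2
          subst ha
          have hl : t ++ '.' :: e' = l := by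
            have h2 := congrArg List.dropLast hsplit
            rw [List.dropLast_concat, List.dropLast_concat] at h2
            exact h2
          have hfree' : '.' ∉ e' := fun h => hfree (by simp [h])
          have := (ih e').mpr ⟨⟨t, hl⟩, hfree'⟩
          rw [this]
          simp

theorem pvExt_facts : ∀ ext ∈ pvExtFilter, '.' ∉ ext := by decide

-- ===== VERDICT (by name: the statement is the Claim_ definition above) =====
theorem NAME_FILTER_py_spec : Claim_equal_NAME_FILTER_py := by
  intro file_name _
  unfold Spec_NAME_FILTER_py NAME_FILTER_py NAME_FILTER_py_alt
  simp only [if_neg (by decide : ¬ pvExtFilter.length < 1)]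
  set fl := PySem.Chars.lower file_name.toList with hfl
  rw [pvFoldOr]
  simp only [Bool.false_or]
  rcases hst : fl.foldl pvStep none with _ | e
  · rw [List.any_eq_false]
    intro ext hext hcond
    have hs := (pvCondA fl ext).mp hcond
    have h2 := (pvLast_some_iff fl ext).mpr ⟨hs, (pvExt_facts ext hext)⟩
    rw [hst] at h2
    simp at h2
  · by_cases he : e ∈ pvExtFilter
    · have hs := (pvLast_some_iff fl e).mp hst
      have h1 : pvExtFilter.any (fun ext =>
          decide (fl.length > ext.length) && PySem.Chars.endswith fl ext &&
            (PySem.Chars.pyGet? fl ((fl.length : Int) - (ext.length : Int) - 1) == some '.')) = true :=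
        List.any_eq_true.mpr ⟨e, he, (pvCondA fl e).mpr hs.1⟩
      have h2 : pvExtFilter.contains e = true := by
        simpa using he
      rw [h1]
      simpa using h2.symm
    · have h2 : pvExtFilter.contains e = false := by
        simpa using he
      have h1 : pvExtFilter.any (fun ext =>
          decide (fl.length > ext.length) && PySem.Chars.endswith fl ext &&
            (PySem.Chars.pyGet? fl ((fl.length : Int) - (ext.length : Int) - 1) == some '.')) = false := by
        rw [List.any_eq_false]
        intro ext hext hcond
        have hs := (pvCondA fl ext).mp hcond
        have h3 := (pvLast_some_iff fl ext).mpr ⟨hs, (pvExt_facts ext hext)⟩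
        rw [hst] at h3
        simp at h3
        subst h3
        exact he hext
      rw [h1]
      simpa using h2.symm
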